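-- pv_equiv track=rewrite | github.com/arun271100/MTICA | Yield_Demo_05.py | yield_Demo
-- ===== SOURCE A (Python) =====
-- def yield_Demo(a,b):
--     res=0
--     if a>b:
--         for i in range(b,a-1,-1):
--             res+=i
--             yield 'i=',i,'res=',res
--
--     else:
--         for i in range(a,b+1):
--             res+=i
--             yield 'i=',i,'res=',res
-- ===== SOURCE B (Python) =====
-- def yield_Demo(a, b):
--     for i in range(a, b + 1):
--         yield 'i=', i, 'res=', (a + i) * (i - a + 1) // 2
-- ===== Notes on version B (the rewrite author's own statement) =====
-- stated objective: simpler
-- what changed: Removed the dead a>b branch (its countdown range is always empty) and replaced the running accumulator with the closed-form partial sum (a+i)*(i-a+1)//2 computed directly at each step of one flat loop.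
import Mathlib
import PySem

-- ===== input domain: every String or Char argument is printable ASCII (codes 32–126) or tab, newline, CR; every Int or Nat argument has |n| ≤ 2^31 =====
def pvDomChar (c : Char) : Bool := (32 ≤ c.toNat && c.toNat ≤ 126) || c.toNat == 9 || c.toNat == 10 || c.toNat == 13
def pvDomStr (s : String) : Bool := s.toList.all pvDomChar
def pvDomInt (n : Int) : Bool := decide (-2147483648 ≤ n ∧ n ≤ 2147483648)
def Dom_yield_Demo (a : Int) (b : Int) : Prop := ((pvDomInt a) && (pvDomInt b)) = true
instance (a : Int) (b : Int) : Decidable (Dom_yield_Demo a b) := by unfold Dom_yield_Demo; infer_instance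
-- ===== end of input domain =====

-- B drops A's dead a>b branch and replaces the running accumulator with the closed-form
-- partial sum (a+i)*(i-a+1)//2 at each step (objective: simpler; same O(n) cost).

-- ===== PORT A =====
-- A: res=0, then a state-carrying loop over the chosen range, yielding the tuple each step.
def yield_Demo (a : Int) (b : Int) : List (String × Int × String × Int) :=
  if a > b then
    ((PySem.List.pyRange b (a - 1) (-1)).foldl
      (fun (st : Int × List (String × Int × String × Int)) i =>
        let res := st.1 + i
        (res, st.2 ++ [("i=", i, "res=", res)])) (0, [])).2
  else
    ((PySem.List.pyRange a (b + 1) 1).foldl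
      (fun (st : Int × List (String × Int × String × Int)) i =>
        let res := st.1 + i
        (res, st.2 ++ [("i=", i, "res=", res)])) (0, [])).2

-- ===== PORT B =====
-- B: one flat loop, each running sum computed by the closed form (a+i)*(i-a+1)//2.
def yield_Demo_alt (a : Int) (b : Int) : List (String × Int × String × Int) :=
  (PySem.List.pyRange a (b + 1) 1).map
    (fun i => ("i=", i, "res=", PySem.Int.floordiv ((a + i) * (i - a + 1)) 2))

-- ===== PRECONDITION & SPEC =====
def Spec_yield_Demo (a : Int) (b : Int) (out : List (String × Int × String × Int)) : Prop := out = yield_Demo_alt a b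
instance (a : Int) (b : Int) (out : List (String × Int × String × Int)) : Decidable (Spec_yield_Demo a b out) := by unfold Spec_yield_Demo; infer_instance

-- ===== CLAIM (what is proved, stated in full; the proofs are below) =====
def Claim_equal_yield_Demo : Prop := ∀ (a : Int) (b : Int), Dom_yield_Demo a b → Spec_yield_Demo a b (yield_Demo a b)

-- ===== LEMMAS AND PROOFS =====

-- the closed-form running sum
def pvT (a i : Int) : Int := PySem.Int.floordiv ((a + i) * (i - a + 1)) 2

theorem pv_fd2 (p q : Int) (h : p = 2 * q) : PySem.Int.floordiv p 2 = q := by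
  rw [PySem.Int.floordiv_eq_ediv_of_pos (by norm_num)]
  omega

theorem pvT_step (a i : Int) : pvT a (i - 1) + i = pvT a i := by
  unfold pvT
  rcases Int.even_or_odd (i - a) with ⟨k, hk⟩ | ⟨k, hk⟩
  · rw [pv_fd2 ((a + (i - 1)) * ((i - 1) - a + 1)) ((a + i - 1) * k) (by rw [show i = a + (k + k) by omega]; ring),
        pv_fd2 ((a + i) * (i - a + 1)) ((a + k) * (i - a + 1)) (by rw [show i = a + (k + k) by omega]; ring)]
    rw [show i = a + (k + k) by omega]; ring
  · rw [pv_fd2 ((a + (i - 1)) * ((i - 1) - a + 1)) ((k + a) * (i - a)) (by rw [show i = a + (2 * k + 1) by omega]; ring),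
        pv_fd2 ((a + i) * (i - a + 1)) ((a + i) * (k + 1)) (by rw [show i = a + (2 * k + 1) by omega]; ring)]
    rw [show i = a + (2 * k + 1) by omega]; ring

theorem pv_loop (a b : Int) : ∀ (n : Nat) (lo : Int) (pref : List (String × Int × String × Int)),
    (b + 1 - lo).toNat = n →
    ((PySem.List.pyRange lo (b + 1) 1).foldl
      (fun (st : Int × List (String × Int × String × Int)) i =>
        let res := st.1 + i
        (res, st.2 ++ [("i=", i, "res=", res)])) (pvT a (lo - 1), pref)).2
    = pref ++ (PySem.List.pyRange lo (b + 1) 1).map (fun i => ("i=", i, "res=", pvT a i)) := by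
  intro n
  induction n with
  | zero =>
    intro lo pref h
    rw [PySem.List.pyRange_one_eq_nil (by omega)]
    simp
  | succ m ih =>
    intro lo pref h
    rw [PySem.List.pyRange_one_cons (by omega)]
    simp only [List.foldl_cons, List.map_cons]
    rw [pvT_step a lo]
    have := ih (lo + 1) (pref ++ [("i=", lo, "res=", pvT a lo)]) (by omega)
    simp only [show lo + 1 - 1 = lo by ring] at this
    rw [this, List.append_assoc]
    rfl

theorem pvT_init (a : Int) : pvT a (a - 1) = 0 := by
  unfold pvT
  exact pv_fd2 _ 0 (by ring)

-- ===== VERDICT (by name: the statement is the Claim_ definition above) =====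
theorem yield_Demo_spec : Claim_equal_yield_Demo := by
  intro a b _
  unfold Spec_yield_Demo yield_Demo yield_Demo_alt
  by_cases hab : a > b
  · rw [if_pos hab, PySem.List.pyRange_neg_one_eq_nil (by omega),
        PySem.List.pyRange_one_eq_nil (by omega)]
    rfl
  · rw [if_neg hab]
    have h0 : (0 : Int) = pvT a (a - 1) := (pvT_init a).symm
    rw [h0, pv_loop a b (b + 1 - a).toNat a [] rfl]
    simp [pvT]
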